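-- pv_equiv track=rewrite | github.com/netcan/nano-caf | script/gen_pp_size.py | gen_seq
-- ===== SOURCE A (Python) =====
-- def gen_seq(n):
--     seq = ""
--     m = 0
--     for i in reversed(range(n)):
--         seq = seq + "{}, ".format(i+1)
--         m = m+1
--         if m % 10 == 0:
--             seq = seq + "\\\n      "
--
--     return "      " + seq + ")"
-- ===== SOURCE B (Python) =====
-- def gen_seq(n):
--     # Chunk-at-a-time rewrite: emit one line (up to 10 descending numbers) per
--     # iteration, arithmetically, and append the break token only after a full group.
--     parts = ["      "]
--     top = n                      # largest value not yet emitted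
--     while top > 0:
--         lo = max(top - 10, 0)
--         parts.append(''.join('{}, '.format(v) for v in range(top, lo, -1)))
--         if top - lo == 10:
--             parts.append('\\\n      ')
--         top = lo
--     parts.append(')')
--     return ''.join(parts)
-- ===== Notes on version B (the rewrite author's own statement) =====
-- stated objective: alternative
-- what changed: Replaces the flat per-element loop with a modulo counter by a chunk-at-a-time traversal: each iteration formats one whole line of up to ten descending numbers arithmetically, appends the break token only after a full group, and the collected parts are joined once at the end.
import Mathlib
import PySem

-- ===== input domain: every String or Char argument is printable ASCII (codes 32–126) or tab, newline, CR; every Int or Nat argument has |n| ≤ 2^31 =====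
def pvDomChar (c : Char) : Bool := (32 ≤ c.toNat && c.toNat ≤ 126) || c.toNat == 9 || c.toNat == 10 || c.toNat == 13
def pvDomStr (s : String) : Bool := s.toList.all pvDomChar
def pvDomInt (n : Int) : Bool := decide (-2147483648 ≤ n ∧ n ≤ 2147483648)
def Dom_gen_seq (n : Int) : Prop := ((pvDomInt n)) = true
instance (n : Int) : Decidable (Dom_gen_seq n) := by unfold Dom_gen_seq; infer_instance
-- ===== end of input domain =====

-- B replaces A's flat per-element loop with a modulo counter by a chunk-at-a-time
-- traversal of the descending number list (groups of 10, joined at the end); same result.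

-- ===== PORT A =====
-- for i in reversed(range(n)): seq += "{}, ".format(i+1); m += 1; if m % 10 == 0: seq += "\\\n      "
-- (Int % with the positive literal divisor 10 agrees with Python's % here.)
def gen_seq (n : Int) : String :=
  let st := ((PySem.List.pyRange 0 n 1).reverse).foldl
    (fun (st : String × Int) i =>
      let seq := st.1 ++ (PySem.Int.toStr (i + 1) ++ ", ")
      let m := st.2 + 1
      if m % 10 == 0 then (seq ++ "\\\n      ", m) else (seq, m))
    ("", 0)
  "      " ++ st.1 ++ ")"

-- ===== PORT B =====
-- the while-loop of Source B: one iteration emits the chunk of up to 10 descending values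
-- range(top, lo, -1), appends the break token after a full group, and continues from lo
def genChunksB (top : Int) (parts : List String) : List String :=
  if _h : 0 < top then
    let lo := max (top - 10) 0
    let parts1 := parts ++
      [PySem.Str.join "" ((PySem.List.pyRange top lo (-1)).map (fun v => PySem.Int.toStr v ++ ", "))]
    let parts2 := if top - lo == 10 then parts1 ++ ["\\\n      "] else parts1
    genChunksB lo parts2
  else parts
termination_by top.toNat
decreasing_by
  omega

def gen_seq_alt (n : Int) : String :=
  let parts := genChunksB n ["      "]
  PySem.Str.join "" (parts ++ [")"])

-- ===== PRECONDITION & SPEC =====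
def Spec_gen_seq (n : Int) (out : String) : Prop := out = gen_seq_alt n
instance (n : Int) (out : String) : Decidable (Spec_gen_seq n out) := by unfold Spec_gen_seq; infer_instance

-- ===== CLAIM (what is proved, stated in full; the proofs are below) =====
def Claim_equal_gen_seq : Prop := ∀ (n : Int), Dom_gen_seq n → Spec_gen_seq n (gen_seq n)

-- ===== LEMMAS AND PROOFS =====

-- one formatted item "v, "
def itemStr (v : Int) : String := PySem.Int.toStr v ++ ", "
-- the line-break token
def brkS : String := "\\\n      "

-- A's loop body as a named function (definitionally the lambda inside gen_seq)
def stepA (st : String × Int) (i : Int) : String × Int :=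
  let seq := st.1 ++ (PySem.Int.toStr (i + 1) ++ ", ")
  let m := st.2 + 1
  if m % 10 == 0 then (seq ++ "\\\n      ", m) else (seq, m)

-- A's loop, characterised elementwise: counter m, break after every 10th element
def flatG (m : Int) : List Int → String
  | [] => ""
  | v :: xs => itemStr v ++ ((if (m + 1) % 10 == 0 then brkS else "") ++ flatG (m + 1) xs)

-- B's loop, characterised as a chunk recursion producing the string directly
def chunkG (l : List Int) : String :=
  if _h : l = [] then ""
  else
    PySem.Str.join "" ((l.take 10).map itemStr) ++
      ((if (l.take 10).length == 10 then brkS else "") ++ chunkG (l.drop 10))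
termination_by l.length
decreasing_by
  have := List.length_pos_of_ne_nil _h
  simp
  omega

theorem flat_int : ∀ (l : List (List Char)), (List.intersperse ([] : List Char) l).flatten = l.flatten
  | [] => rfl
  | [_] => rfl
  | a :: b :: t => by
      simp only [List.intersperse]
      simp [flat_int (b :: t)]

theorem join_empty_nil : PySem.Str.join "" ([] : List String) = "" := rfl

theorem join_empty_cons (s : String) (r : List String) :
    PySem.Str.join "" (s :: r) = s ++ PySem.Str.join "" r := by
  have h0 : "".toList = ([] : List Char) := rfl
  simp only [PySem.Str.join, PySem.Chars.join, List.intercalate, List.map, h0, flat_int,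
    List.flatten_cons, String.ofList_append, String.ofList_toList]

theorem join_empty_append (a b : List String) :
    PySem.Str.join "" (a ++ b) = PySem.Str.join "" a ++ PySem.Str.join "" b := by
  induction a with
  | nil => simp [join_empty_nil]
  | cons s t ih => simp [join_empty_cons, ih, String.append_assoc]

-- A's fold, unrolled: the accumulated string is seq ++ flatG m (values i+1)
theorem foldA_eq (l : List Int) : ∀ (seq : String) (m : Int),
    (l.foldl stepA (seq, m)).1 = seq ++ flatG m (l.map (· + 1)) := by
  induction l with
  | nil => intro seq m; simp [flatG]
  | cons i t ih =>
      intro seq m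
      rw [List.foldl_cons]
      have hstep : stepA (seq, m) i =
          (seq ++ (PySem.Int.toStr (i + 1) ++ ", ") ++ (if (m + 1) % 10 == 0 then brkS else ""),
            m + 1) := by
        unfold stepA brkS
        by_cases h : ((m + 1) % 10 == 0) = true <;> simp [h]
      rw [hstep, ih]
      simp only [List.map_cons, flatG, itemStr]
      by_cases h : ((m + 1) % 10 == 0) = true <;> simp [h, String.append_assoc]

-- splitting the descending range at the chunk boundary lo
theorem split_pyRange (top : Int) (h : 0 < top) :
    PySem.List.pyRange top 0 (-1) =
      PySem.List.pyRange top (max (top - 10) 0) (-1) ++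
        PySem.List.pyRange (max (top - 10) 0) 0 (-1) := by
  rw [PySem.List.pyRange_neg_one_eq_reverse top 0,
    PySem.List.pyRange_neg_one_eq_reverse top (max (top - 10) 0),
    PySem.List.pyRange_neg_one_eq_reverse (max (top - 10) 0) 0,
    ← List.reverse_append]
  congr 1
  exact PySem.List.pyRange_one_append (0 + 1) (max (top - 10) 0 + 1) (top + 1)
    (by omega) (by omega)

-- B's loop produces exactly chunkG of the remaining descending range, joined onto parts
theorem genChunksB_join (top : Int) (parts : List String) :
    PySem.Str.join "" (genChunksB top parts) =
      PySem.Str.join "" parts ++ chunkG (PySem.List.pyRange top 0 (-1)) := by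
  induction top, parts using genChunksB.induct with
  | case2 top parts h =>
      rw [genChunksB, chunkG]
      have hnil : PySem.List.pyRange top 0 (-1) = [] :=
        PySem.List.pyRange_neg_one_eq_nil (by omega)
      simp [h, hnil]
  | case1 top parts h lo parts1 parts2 ih =>
      simp only [lo, parts1, parts2, dite_eq_ite] at ih
      rw [genChunksB, chunkG]
      have hA : (PySem.List.pyRange top (max (top - 10) 0) (-1)).length =
          (top - max (top - 10) 0).toNat := PySem.List.length_pyRange_neg_one _ _
      have hsplit := split_pyRange top h
      have hne : PySem.List.pyRange top 0 (-1) ≠ [] := by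
        intro hn
        have hl := PySem.List.length_pyRange_neg_one top 0
        rw [hn] at hl
        simp at hl
        omega
      rw [dif_pos h, dif_neg hne]
      by_cases h10 : 10 ≤ top
      · have hlo : max (top - 10) 0 = top - 10 := by omega
        have hlen : (PySem.List.pyRange top (max (top - 10) 0) (-1)).length = 10 := by
          rw [hA]; omega
        have htake : (PySem.List.pyRange top 0 (-1)).take 10 =
            PySem.List.pyRange top (max (top - 10) 0) (-1) := by
          rw [hsplit]; exact List.take_left' hlen
        have hdrop : (PySem.List.pyRange top 0 (-1)).drop 10 =
            PySem.List.pyRange (max (top - 10) 0) 0 (-1) := by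
          rw [hsplit]; exact List.drop_left' hlen
        have hc1 : ((top - max (top - 10) 0 == 10) : Bool) = true := by
          simp; omega
        have hc2 : (((PySem.List.pyRange top 0 (-1)).take 10).length == 10) = true := by
          rw [htake, hlen]
          simp
        simp only [hc1, hc2, if_true, ite_true] at ih ⊢
        rw [ih, htake, hdrop, join_empty_append, join_empty_append, join_empty_cons,
          join_empty_cons, join_empty_nil]
        simp [brkS, String.append_assoc]
        rw [show (fun v => PySem.Int.toStr v ++ ", ") = itemStr from rfl]
      · have hlo : max (top - 10) 0 = 0 := by omega
        have hBnil : PySem.List.pyRange (max (top - 10) 0) 0 (-1) = [] := by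
          rw [hlo]; exact PySem.List.pyRange_neg_one_eq_nil le_rfl
        have htake : (PySem.List.pyRange top 0 (-1)).take 10 =
            PySem.List.pyRange top (max (top - 10) 0) (-1) := by
          rw [hsplit, hBnil, List.append_nil]
          exact List.take_of_length_le (by rw [hA]; omega)
        have hdrop : (PySem.List.pyRange top 0 (-1)).drop 10 = [] := by
          rw [hsplit, hBnil, List.append_nil]
          exact List.drop_eq_nil_of_le (by rw [hA]; omega)
        have hc1 : ((top - max (top - 10) 0 == 10) : Bool) = false := by
          simp; omega
        have hc2 : (((PySem.List.pyRange top 0 (-1)).take 10).length == 10) = false := by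
          rw [htake, hA]; simp; omega
        simp only [hc1, hc2, Bool.false_eq_true, if_false] at ih ⊢
        rw [ih, hlo, htake, hdrop, join_empty_append, join_empty_cons, join_empty_nil,
          chunkG]
        simp [String.append_assoc]
        rw [show (fun v => PySem.Int.toStr v ++ ", ") = itemStr from rfl,
          hsplit, hBnil, List.append_nil, chunkG]
        simp

-- flatG across one partial group: j = steps to the next multiple of 10
theorem flat_aux : ∀ (l : List Int) (j : Nat) (m : Int), 1 ≤ j → (j : Int) + m % 10 = 10 →
    flatG m l = PySem.Str.join "" ((l.take j).map itemStr) ++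
      (if j ≤ l.length then brkS ++ flatG (m + j) (l.drop j) else "") := by
  intro l
  induction l with
  | nil =>
      intro j m hj _
      simp only [flatG, List.take_nil, List.map_nil, join_empty_nil, List.length_nil]
      rw [if_neg (by omega)]
      simp
  | cons v xs ih =>
      intro j m hj hm
      by_cases h1 : j = 1
      · -- j = 1 : the break fires after v
        subst h1
        have hmod : ((m + 1) % 10 == 0) = true := by simp; omega
        simp [flatG, hmod, join_empty_cons, join_empty_nil, String.append_assoc]
      · -- j ≥ 2 : no break after v, recurse with j-1
        obtain ⟨j', rfl⟩ : ∃ j', j = j' + 1 := ⟨j - 1, by omega⟩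
        have hmod : ¬ (((m + 1) % 10 == 0) = true) := by simp; omega
        have ihx := ih j' (m + 1) (by omega) (by push_cast; omega)
        rw [flatG, ihx]
        simp only [List.take_succ_cons, List.drop_succ_cons, List.map_cons, join_empty_cons,
          List.length_cons, hmod]
        have hc : (m + 1) + (j' : Int) = m + ((j' + 1 : Nat) : Int) := by push_cast; ring
        rw [hc]
        simp only [Nat.add_le_add_iff_right]
        simp [String.append_assoc]

-- at a counter that is a multiple of 10, A's flat rendering equals B's chunk rendering
theorem flat_chunk (l : List Int) : ∀ (m : Int), m % 10 = 0 → flatG m l = chunkG l := by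
  induction l using chunkG.induct with
  | case1 => intro m _; simp [flatG, chunkG]
  | case2 l h ih =>
      intro m hm
      rw [flat_aux l 10 m (by omega) (by omega), chunkG]
      simp only [h, dif_neg, not_false_iff]
      have hc : m + ((10 : Nat) : Int) = m + 10 := by norm_num
      rw [hc]
      by_cases hlen : 10 ≤ l.length
      · have ht : ((l.take 10).length == 10) = true := by simp [hlen]
        rw [ih (m + 10) (by omega)]
        simp [hlen, ht]
      · have hd : l.drop 10 = [] := List.drop_eq_nil_of_le (by omega)
        have ht : ((l.take 10).length == 10) = false := by simp; omega
        simp [hlen, ht, hd, chunkG]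

-- the two descending value lists coincide
theorem lists_eq (n : Int) :
    ((PySem.List.pyRange 0 n 1).reverse).map (· + 1) = PySem.List.pyRange n 0 (-1) := by
  rw [PySem.List.pyRange_neg_one_eq_reverse, List.map_reverse]
  congr 1
  simp only [PySem.List.pyRange_one, List.map_map]
  have h : (n : Int) - 0 = n + 1 - 1 := by ring
  rw [h]
  exact List.map_congr_left (fun k _ => by simp; ring)

-- ===== VERDICT (by name: the statement is the Claim_ definition above) =====
theorem gen_seq_spec : Claim_equal_gen_seq := by
  intro n _
  unfold Spec_gen_seq
  have hA : gen_seq n =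
      "      " ++ (((PySem.List.pyRange 0 n 1).reverse).foldl stepA ("", 0)).1 ++ ")" := rfl
  have hB : gen_seq_alt n =
      PySem.Str.join "" (genChunksB n ["      "] ++ [")"]) := rfl
  rw [hA, hB, foldA_eq, lists_eq, flat_chunk _ 0 (by norm_num), join_empty_append,
    genChunksB_join, join_empty_cons, join_empty_cons, join_empty_nil]
  simp [String.append_assoc]
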